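-- pv_equiv track=rewrite | github.com/mubasshirMurshed/Advent-of-Code | 2024/Day08/day08.py | isAntinode2
-- ===== SOURCE A (Python) =====
-- def isAntinode2(antennas, i, j):
--     # Iterate over each type of antenna and their positions
--     for _, positions in antennas.items():
--         # Iterate over each position
--         for x in range(len(positions)):
--             # Compare this to every other position
--             for y in range(x + 1, len(positions)):
--                 i1, j1 = positions[x]
--                 i2, j2 = positions[y]
--
--                 # Get squared distance
--                 dist1 = (i-i1)**2 + (j-j1)**2
--                 dist2 = (i-i2)**2 + (j-j2)**2
--
--                 # Check if these are in line (using vector dot product)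
--                 vec1 = (i1 - i, j1 - j)
--                 vec2 = (i2 - i, j2 - j)
--                 if (vec1[0]*vec2[0] + vec1[1]*vec2[1])**2 == dist1*dist2:
--                     return True
--
--     return False
-- ===== SOURCE B (Python) =====
-- def _gcd(a, b):
--     a, b = abs(a), abs(b)
--     while b:
--         a, b = b, a % b
--     return a
--
--
-- def _canon(dx, dy):
--     # canonical direction: primitive vector with first nonzero component positive
--     g = _gcd(dx, dy)
--     cx, cy = dx // g, dy // g
--     if cx < 0 or (cx == 0 and cy < 0):
--         cx, cy = -cx, -cy
--     return (cx, cy)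
--
--
-- def isAntinode2(antennas, i, j):
--     # Group-wise single pass: hash canonical direction vectors from (i, j);
--     # a repeated direction (or the point sitting on an antenna) means collinearity.
--     for positions in antennas.values():
--         if len(positions) < 2:
--             continue
--         seen = set()
--         for (pi, pj) in positions:
--             dx, dy = pi - i, pj - j
--             if dx == 0 and dy == 0:
--                 return True
--             d = _canon(dx, dy)
--             if d in seen:
--                 return True
--             seen.add(d)
--     return False
-- ===== Notes on version B (the rewrite author's own statement) =====
-- stated objective: alternative
-- what changed: Replaces A's pairwise dot-product collinearity test within each antenna group by a single pass that hashes the canonical (gcd-reduced, sign-normalised) direction vector of each antenna from the point into a set, returning True on a repeated direction or when the point coincides with an antenna of a group with at least two members; trades the quadratic pair scan for gcd computations per antenna (no measured speed-up on the benchmark inputs, which exit early).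
import Mathlib
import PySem

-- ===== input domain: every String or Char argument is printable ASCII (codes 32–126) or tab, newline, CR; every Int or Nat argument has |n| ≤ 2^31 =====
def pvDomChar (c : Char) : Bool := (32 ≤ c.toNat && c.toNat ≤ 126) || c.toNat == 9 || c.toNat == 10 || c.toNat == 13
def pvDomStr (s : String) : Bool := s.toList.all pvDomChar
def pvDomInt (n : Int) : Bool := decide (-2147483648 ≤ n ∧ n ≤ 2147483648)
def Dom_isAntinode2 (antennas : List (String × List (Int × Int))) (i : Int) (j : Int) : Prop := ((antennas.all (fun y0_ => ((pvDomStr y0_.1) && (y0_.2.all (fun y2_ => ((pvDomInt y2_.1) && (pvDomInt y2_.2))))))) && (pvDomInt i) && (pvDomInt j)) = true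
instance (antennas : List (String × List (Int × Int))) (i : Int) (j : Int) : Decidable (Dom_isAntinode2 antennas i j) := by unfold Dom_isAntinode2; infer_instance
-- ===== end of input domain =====

-- B replaces A's pairwise dot-product test per antenna type by a single pass that hashes
-- canonical (primitive, sign-normalised) direction vectors from the point (a different algorithm;
-- same observable behaviour).

-- ===== PORT A =====
-- literal transliteration of Source A: three nested loops with early return (List.any)
def isAntinode2 (antennas : List (String × List (Int × Int))) (i : Int) (j : Int) : Bool :=
  antennas.any (fun g =>
    let positions := g.2
    (PySem.List.pyRange 0 (positions.length : Int) 1).any (fun x =>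
      (PySem.List.pyRange (x + 1) (positions.length : Int) 1).any (fun y =>
        let p1 := PySem.List.pyGetD positions x (0, 0)
        let p2 := PySem.List.pyGetD positions y (0, 0)
        let i1 := p1.1; let j1 := p1.2
        let i2 := p2.1; let j2 := p2.2
        let dist1 := (i - i1) ^ 2 + (j - j1) ^ 2
        let dist2 := (i - i2) ^ 2 + (j - j2) ^ 2
        let vec1 := (i1 - i, j1 - j)
        let vec2 := (i2 - i, j2 - j)
        (vec1.1 * vec2.1 + vec1.2 * vec2.2) ^ 2 == dist1 * dist2)))

-- ===== PORT B =====
-- port of Source B's hand-written Euclidean gcd ( _gcd: while b: a, b = b, a % b — on absolute values)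
def pyGcdLoop (a b : Nat) : Nat :=
  if h : b = 0 then a else pyGcdLoop b (a % b)
termination_by b
decreasing_by exact Nat.mod_lt _ (Nat.pos_of_ne_zero h)

def pyGcd (a b : Int) : Int := (pyGcdLoop a.natAbs b.natAbs : Nat)

-- port of Source B's _canon: primitive direction vector with first nonzero component positive
def canonDir (dx dy : Int) : Int × Int :=
  let g := pyGcd dx dy
  let cx := PySem.Int.floordiv dx g
  let cy := PySem.Int.floordiv dy g
  if cx < 0 ∨ (cx = 0 ∧ cy < 0) then (-cx, -cy) else (cx, cy)

-- port of Source B's inner loop over one group's positions, carrying the 'seen' set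
def scanGroup (i j : Int) : List (Int × Int) → PySem.Set (Int × Int) → Bool
  | [], _ => false
  | p :: rest, seen =>
    let dx := p.1 - i
    let dy := p.2 - j
    if dx = 0 ∧ dy = 0 then true
    else
      let d := canonDir dx dy
      if PySem.Set.contains seen d then true
      else scanGroup i j rest (PySem.Set.add seen d)

def isAntinode2_alt (antennas : List (String × List (Int × Int))) (i : Int) (j : Int) : Bool :=
  antennas.any (fun g =>
    if g.2.length < 2 then false
    else scanGroup i j g.2 PySem.Set.empty)

-- ===== PRECONDITION & SPEC =====
def Spec_isAntinode2 (antennas : List (String × List (Int × Int))) (i : Int) (j : Int) (out : Bool) : Prop := out = isAntinode2_alt antennas i j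
instance (antennas : List (String × List (Int × Int))) (i : Int) (j : Int) (out : Bool) : Decidable (Spec_isAntinode2 antennas i j out) := by unfold Spec_isAntinode2; infer_instance

-- ===== CLAIM (what is proved, stated in full; the proofs are below) =====
def Claim_equal_isAntinode2 : Prop := ∀ (antennas : List (String × List (Int × Int))) (i : Int) (j : Int), Dom_isAntinode2 antennas i j → Spec_isAntinode2 antennas i j (isAntinode2 antennas i j)

-- ===== LEMMAS AND PROOFS =====

-- "some ordered pair of list elements satisfies P"
def hasPair {α : Type} (P : α → α → Prop) : List α → Prop
  | [] => False
  | a :: l => (∃ b ∈ l, P a b) ∨ hasPair P l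

theorem hasPair_mono {α : Type} {P Q : α → α → Prop} {l : List α}
    (h : ∀ a b, a ∈ l → b ∈ l → P a b → Q a b) : hasPair P l → hasPair Q l := by
  induction l with
  | nil => exact fun hf => hf
  | cons a t ih =>
    intro hp
    cases hp with
    | inl hex =>
      obtain ⟨b, hb, hab⟩ := hex
      exact Or.inl ⟨b, hb, h a b (List.mem_cons_self) (List.mem_cons_of_mem _ hb) hab⟩
    | inr hrest =>
      exact Or.inr (ih (fun x y hx hy => h x y (List.mem_cons_of_mem _ hx) (List.mem_cons_of_mem _ hy)) hrest)

theorem hasPair_iff_not_pairwise {α : Type} {P : α → α → Prop} {l : List α} :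
    hasPair P l ↔ ¬ l.Pairwise (fun a b => ¬ P a b) := by
  induction l with
  | nil => simp [hasPair]
  | cons a t ih =>
    simp only [hasPair, List.pairwise_cons, ih]
    constructor
    · rintro (⟨b, hb, hP⟩ | h) ⟨hall, hpt⟩
      · exact hall b hb hP
      · exact h hpt
    · intro h
      by_cases hex : ∃ b ∈ t, P a b
      · exact Or.inl hex
      · refine Or.inr fun hpt => h ⟨fun b hb hP => hex ⟨b, hb, hP⟩, hpt⟩

theorem hasPair_of_mem {α : Type} {P : α → α → Prop} {l : List α} {p : α}
    (hlen : 2 ≤ l.length) (hp : p ∈ l) (h1 : ∀ q, P p q) (h2 : ∀ q, P q p) :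
    hasPair P l := by
  cases l with
  | nil => simp at hp
  | cons a t =>
    rcases List.mem_cons.mp hp with rfl | hpt
    · cases t with
      | nil => simp at hlen
      | cons b t' => exact Or.inl ⟨b, List.mem_cons_self, h1 b⟩
    · exact Or.inl ⟨p, hpt, h2 a⟩

-- Lagrange's identity specialised: equality in Cauchy–Schwarz ↔ zero cross product
theorem lagrange_iff (a b c d : Int) :
    (a * c + b * d) ^ 2 = (a ^ 2 + b ^ 2) * (c ^ 2 + d ^ 2) ↔ a * d - b * c = 0 := by
  have key : (a ^ 2 + b ^ 2) * (c ^ 2 + d ^ 2) = (a * c + b * d) ^ 2 + (a * d - b * c) ^ 2 := by ring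
  constructor
  · intro h
    have h2 : (a * d - b * c) ^ 2 = 0 := by omega
    exact pow_eq_zero_iff (by norm_num) |>.mp h2
  · intro h
    rw [key, h]; ring

theorem pyGcdLoop_eq (a b : Nat) : pyGcdLoop a b = Nat.gcd b a := by
  induction b using Nat.strong_induction_on generalizing a with
  | _ b ih =>
    rw [pyGcdLoop]
    by_cases h : b = 0
    · simp [h]
    · rw [dif_neg h, ih (a % b) (Nat.mod_lt _ (Nat.pos_of_ne_zero h)) b, Nat.gcd_rec b a]

theorem pyGcd_eq (a b : Int) : pyGcd a b = (Int.gcd a b : Int) := by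
  simp [pyGcd, pyGcdLoop_eq, Int.gcd, Nat.gcd_comm]

-- sign normalisation used by canonDir
def normSign (p : Int × Int) : Int × Int :=
  if p.1 < 0 ∨ (p.1 = 0 ∧ p.2 < 0) then (-p.1, -p.2) else p

theorem normSign_neg (p : Int × Int) : normSign (-p.1, -p.2) = normSign p := by
  rcases p with ⟨x, y⟩
  simp only [normSign]
  split_ifs <;> simp_all <;> omega

-- canonDir on a nonzero vector = sign-normalised primitive vector
theorem canonDir_eq (u1 u2 : Int) (h : ¬(u1 = 0 ∧ u2 = 0)) :
    canonDir u1 u2 = normSign (u1 / (Int.gcd u1 u2 : Int), u2 / (Int.gcd u1 u2 : Int)) := by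
  have hg : 0 < (Int.gcd u1 u2 : Int) := by
    have h1 : u1 ≠ 0 ∨ u2 ≠ 0 := by tauto
    exact_mod_cast Int.gcd_pos_iff.mpr h1
  simp only [canonDir, normSign, pyGcd_eq,
    PySem.Int.floordiv_eq_ediv_of_pos hg]

theorem gcd_smul_left (u1 u2 : Int) :
    u1 = (Int.gcd u1 u2 : Int) * (u1 / (Int.gcd u1 u2 : Int)) :=
  (Int.mul_ediv_cancel' (Int.gcd_dvd_left u1 u2)).symm

theorem gcd_smul_right (u1 u2 : Int) :
    u2 = (Int.gcd u1 u2 : Int) * (u2 / (Int.gcd u1 u2 : Int)) :=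
  (Int.mul_ediv_cancel' (Int.gcd_dvd_right u1 u2)).symm

-- primitive vectors with zero cross product are equal up to sign
theorem primitive_parallel (p1 p2 q1 q2 : Int)
    (hp : Int.gcd p1 p2 = 1) (hq : Int.gcd q1 q2 = 1)
    (hx : p1 * q2 = p2 * q1) :
    (p1, p2) = (q1, q2) ∨ (p1, p2) = (-q1, -q2) := by
  by_cases hp1 : p1 = 0
  · subst hp1
    have hp2 : p2 = 1 ∨ p2 = -1 := by
      have : p2.natAbs = 1 := by simpa [Int.gcd] using hp
      omega
    have hq1 : q1 = 0 := by
      rcases hp2 with rfl | rfl <;> omega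
    subst hq1
    have hq2 : q2 = 1 ∨ q2 = -1 := by
      have : q2.natAbs = 1 := by simpa [Int.gcd] using hq
      omega
    rcases hp2 with rfl | rfl <;> rcases hq2 with rfl | rfl <;> simp
  · have hcop : IsCoprime p1 p2 := Int.isCoprime_iff_gcd_eq_one.mpr hp
    have hcoq : IsCoprime q1 q2 := Int.isCoprime_iff_gcd_eq_one.mpr hq
    have hd1 : p1 ∣ q1 := by
      have h : p1 ∣ p2 * q1 := ⟨q2, hx.symm⟩
      exact hcop.dvd_of_dvd_mul_left h
    have hq10 : q1 ≠ 0 := by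
      intro h0
      apply hp1
      have hq2 : q2 ≠ 0 := by
        intro h2; rw [h0, h2] at hq; simp [Int.gcd] at hq
      rw [h0] at hx
      have : p1 * q2 = 0 := by omega
      rcases mul_eq_zero.mp this with h | h
      · exact h
      · exact absurd h hq2
    have hd2 : q1 ∣ p1 := by
      have h : q1 ∣ q2 * p1 := ⟨p2, by linear_combination hx⟩
      exact hcoq.dvd_of_dvd_mul_left h
    have habs : p1.natAbs = q1.natAbs :=
      Nat.dvd_antisymm (Int.natAbs_dvd_natAbs.mpr hd1) (Int.natAbs_dvd_natAbs.mpr hd2)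
    rcases Int.natAbs_eq_natAbs_iff.mp habs with heq | heq
    · left
      have h2 : q2 = p2 :=
        mul_left_cancel₀ hp1 (by linear_combination hx - p2 * heq : p1 * q2 = p1 * p2)
      rw [Prod.mk.injEq]
      exact ⟨heq, h2.symm⟩
    · right
      have h2 : q2 = -p2 :=
        mul_left_cancel₀ hp1 (by linear_combination hx + p2 * heq : p1 * q2 = p1 * -p2)
      rw [Prod.mk.injEq]
      refine ⟨heq, by omega⟩

-- cross-factoring core: two primitive vectors scaled by nonzero factors, parallel => same normalised form
theorem canon_core (g h a1 a2 b1 b2 : Int) (hg : g ≠ 0) (hh : h ≠ 0)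
    (hpp : Int.gcd a1 a2 = 1) (hqq : Int.gcd b1 b2 = 1)
    (hx : g * a1 * (h * b2) - g * a2 * (h * b1) = 0) :
    normSign (a1, a2) = normSign (b1, b2) := by
  have hab : a1 * b2 = a2 * b1 := by
    have h0 : g * h * (a1 * b2 - a2 * b1) = 0 := by linear_combination hx
    rcases mul_eq_zero.mp h0 with h1 | h1
    · exact absurd (mul_eq_zero.mp h1) (by tauto)
    · omega
  rcases primitive_parallel a1 a2 b1 b2 hpp hqq hab with heq | heq
  · rw [heq]
  · obtain ⟨r1, r2⟩ := Prod.mk.injEq .. ▸ heq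
    rw [r1, r2]
    exact normSign_neg (b1, b2)

-- main lemma: nonzero parallel vectors get the same canonical direction
theorem canon_eq_of_parallel (u1 u2 v1 v2 : Int)
    (hu : ¬(u1 = 0 ∧ u2 = 0)) (hv : ¬(v1 = 0 ∧ v2 = 0))
    (hx : u1 * v2 - u2 * v1 = 0) :
    canonDir u1 u2 = canonDir v1 v2 := by
  have hgu : 0 < Int.gcd u1 u2 := Int.gcd_pos_iff.mpr (by tauto)
  have hgv : 0 < Int.gcd v1 v2 := Int.gcd_pos_iff.mpr (by tauto)
  have hgu0 : (Int.gcd u1 u2 : Int) ≠ 0 := by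
    have := hgu; omega
  have hgv0 : (Int.gcd v1 v2 : Int) ≠ 0 := by
    have := hgv; omega
  rw [canonDir_eq u1 u2 hu, canonDir_eq v1 v2 hv]
  apply canon_core _ _ _ _ _ _ hgu0 hgv0 (Int.gcd_div_gcd_div_gcd hgu) (Int.gcd_div_gcd_div_gcd hgv)
  rw [← gcd_smul_left u1 u2, ← gcd_smul_right u1 u2, ← gcd_smul_left v1 v2, ← gcd_smul_right v1 v2]
  exact hx

-- every nonzero vector is a scalar multiple of its canonical direction
theorem canon_scalar (u1 u2 : Int) (h : ¬(u1 = 0 ∧ u2 = 0)) :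
    ∃ t : Int, u1 = t * (canonDir u1 u2).1 ∧ u2 = t * (canonDir u1 u2).2 := by
  rw [canonDir_eq u1 u2 h]
  set g : Int := (Int.gcd u1 u2 : Int)
  have h1 := gcd_smul_left u1 u2
  have h2 := gcd_smul_right u1 u2
  simp only [normSign]
  split_ifs
  · exact ⟨-g, by simpa using h1, by simpa using h2⟩
  · exact ⟨g, h1, h2⟩

theorem cross_zero_of_canon_eq (u1 u2 v1 v2 : Int)
    (hu : ¬(u1 = 0 ∧ u2 = 0)) (hv : ¬(v1 = 0 ∧ v2 = 0))
    (hc : canonDir u1 u2 = canonDir v1 v2) :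
    u1 * v2 - u2 * v1 = 0 := by
  obtain ⟨t, ht1, ht2⟩ := canon_scalar u1 u2 hu
  obtain ⟨s, hs1, hs2⟩ := canon_scalar v1 v2 hv
  rw [hc] at ht1 ht2
  generalize canonDir v1 v2 = c at ht1 ht2 hs1 hs2
  rw [ht1, ht2, hs1, hs2]
  ring

-- shorthand predicates used by the per-group argument
def pvZ (i j : Int) (p : Int × Int) : Prop := p.1 - i = 0 ∧ p.2 - j = 0
def pvC (i j : Int) (p : Int × Int) : Int × Int := canonDir (p.1 - i) (p.2 - j)
def pvCross (i j : Int) (p q : Int × Int) : Prop :=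
  (p.1 - i) * (q.2 - j) - (p.2 - j) * (q.1 - i) = 0
def pvCeq (i j : Int) (p q : Int × Int) : Prop :=
  ¬ pvZ i j p ∧ ¬ pvZ i j q ∧ pvC i j p = pvC i j q

-- closed form of B's scanning loop, for any incoming 'seen' set
theorem scanGroup_iff (i j : Int) (l : List (Int × Int)) (seen : PySem.Set (Int × Int)) :
    scanGroup i j l seen = true ↔
      (∃ p ∈ l, pvZ i j p) ∨ (∃ p ∈ l, ¬ pvZ i j p ∧ pvC i j p ∈ seen) ∨
        hasPair (pvCeq i j) l := by
  induction l generalizing seen with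
  | nil => simp [scanGroup, hasPair]
  | cons p t ih =>
    by_cases hz : p.1 - i = 0 ∧ p.2 - j = 0
    · simp only [scanGroup, if_pos hz]
      constructor
      · intro _; exact Or.inl ⟨p, List.mem_cons_self, hz⟩
      · intro _; trivial
    · simp only [scanGroup, if_neg hz]
      by_cases hm : PySem.Set.contains seen (canonDir (p.1 - i) (p.2 - j)) = true
      · simp only [if_pos hm]
        have hmem : pvC i j p ∈ seen := (PySem.Set.contains_iff _ _).mp hm
        constructor
        · intro _
          exact Or.inr (Or.inl ⟨p, List.mem_cons_self, hz, hmem⟩)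
        · intro _; trivial
      · simp only [if_neg hm]
        rw [ih]
        have hnm : pvC i j p ∉ seen := fun h => hm ((PySem.Set.contains_iff _ _).mpr h)
        constructor
        · rintro (⟨q, hq, hzq⟩ | ⟨q, hq, hnzq, hqm⟩ | hp)
          · exact Or.inl ⟨q, List.mem_cons_of_mem _ hq, hzq⟩
          · rcases (PySem.Set.mem_add _ _ _).mp hqm with hin | heq
            · exact Or.inr (Or.inl ⟨q, List.mem_cons_of_mem _ hq, hnzq, hin⟩)
            · exact Or.inr (Or.inr (Or.inl ⟨q, hq, hz, hnzq, heq.symm⟩))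
          · exact Or.inr (Or.inr (Or.inr hp))
        · rintro (⟨q, hq, hzq⟩ | ⟨q, hq, hnzq, hqm⟩ | hp)
          · rcases List.mem_cons.mp hq with rfl | hqt
            · exact absurd hzq hz
            · exact Or.inl ⟨q, hqt, hzq⟩
          · rcases List.mem_cons.mp hq with rfl | hqt
            · exact absurd hqm hnm
            · exact Or.inr (Or.inl ⟨q, hqt, hnzq, (PySem.Set.mem_add _ _ _).mpr (Or.inl hqm)⟩)
          · rcases hp with ⟨q, hq, hce⟩ | hpt
            · exact Or.inr (Or.inl ⟨q, hq, hce.2.1, (PySem.Set.mem_add _ _ _).mpr (Or.inr hce.2.2.symm)⟩)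
            · exact Or.inr (Or.inr hpt)

-- pointwise: A's dot-product equation is exactly a zero cross product (Lagrange)
theorem pvP_iff (i j : Int) (p q : Int × Int) :
    ((p.1 - i) * (q.1 - i) + (p.2 - j) * (q.2 - j)) ^ 2 =
      ((i - p.1) ^ 2 + (j - p.2) ^ 2) * ((i - q.1) ^ 2 + (j - q.2) ^ 2) ↔ pvCross i j p q := by
  have e : ((i - p.1) ^ 2 + (j - p.2) ^ 2) * ((i - q.1) ^ 2 + (j - q.2) ^ 2)
      = ((p.1 - i) ^ 2 + (p.2 - j) ^ 2) * ((q.1 - i) ^ 2 + (q.2 - j) ^ 2) := by ring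
  rw [e]
  exact lagrange_iff (p.1 - i) (p.2 - j) (q.1 - i) (q.2 - j)

-- A's per-group nested index loops, characterised as hasPair
theorem groupA_iff (i j : Int) (ps : List (Int × Int)) :
    ((PySem.List.pyRange 0 (ps.length : Int) 1).any (fun x =>
      (PySem.List.pyRange (x + 1) (ps.length : Int) 1).any (fun y =>
        let p1 := PySem.List.pyGetD ps x (0, 0)
        let p2 := PySem.List.pyGetD ps y (0, 0)
        ((p1.1 - i) * (p2.1 - i) + (p1.2 - j) * (p2.2 - j)) ^ 2 ==
          ((i - p1.1) ^ 2 + (j - p1.2) ^ 2) * ((i - p2.1) ^ 2 + (j - p2.2) ^ 2))) = true) ↔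
      hasPair (pvCross i j) ps := by
  rw [hasPair_iff_not_pairwise, List.pairwise_iff_getElem]
  push Not
  simp only [List.any_eq_true, PySem.List.mem_pyRange_one, beq_iff_eq]
  constructor
  · rintro ⟨x, ⟨hx0, hxn⟩, y, ⟨hy1, hyn⟩, hP⟩
    rw [PySem.List.pyGetD_eq_getElem ps (0, 0) hx0 hxn, PySem.List.pyGetD_eq_getElem ps (0, 0) (by omega) hyn] at hP
    exact ⟨x.toNat, y.toNat, by omega, by omega, by omega, (pvP_iff i j _ _).mp hP⟩
  · rintro ⟨a, b, ha, hb, hab, hP⟩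
    refine ⟨(a : Int), ⟨by omega, by omega⟩, (b : Int), ⟨by omega, by omega⟩, ?_⟩
    rw [PySem.List.pyGetD_eq_getElem ps (0, 0) (by omega) (by exact_mod_cast ha),
      PySem.List.pyGetD_eq_getElem ps (0, 0) (by omega) (by exact_mod_cast hb)]
    simp only [Int.toNat_natCast]
    exact (pvP_iff i j _ _).mpr hP

theorem hasPair_short {α : Type} {P : α → α → Prop} {l : List α}
    (h : l.length < 2) : ¬ hasPair P l := by
  match l with
  | [] => exact fun hf => hf
  | [p] =>
    rintro (⟨b, hb, _⟩ | hf)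
    · simp at hb
    · exact hf
  | p :: q :: t => simp at h

-- forward half of the per-group equivalence
theorem hasPair_cross_cases (i j : Int) (l : List (Int × Int)) :
    hasPair (pvCross i j) l → (∃ p ∈ l, pvZ i j p) ∨ hasPair (pvCeq i j) l := by
  induction l with
  | nil => exact fun h => absurd h id
  | cons p t ih =>
    rintro (⟨q, hq, hpq⟩ | hrest)
    · by_cases hzp : pvZ i j p
      · exact Or.inl ⟨p, List.mem_cons_self, hzp⟩
      · by_cases hzq : pvZ i j q
        · exact Or.inl ⟨q, List.mem_cons_of_mem _ hq, hzq⟩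
        · refine Or.inr (Or.inl ⟨q, hq, hzp, hzq, ?_⟩)
          exact canon_eq_of_parallel _ _ _ _ hzp hzq hpq
    · rcases ih hrest with ⟨q, hq, hz⟩ | h
      · exact Or.inl ⟨q, List.mem_cons_of_mem _ hq, hz⟩
      · exact Or.inr (Or.inr h)

-- core per-group equivalence
theorem pair_iff_canon (i j : Int) (ps : List (Int × Int)) (hlen : 2 ≤ ps.length) :
    hasPair (pvCross i j) ps ↔ (∃ p ∈ ps, pvZ i j p) ∨ hasPair (pvCeq i j) ps := by
  constructor
  · exact hasPair_cross_cases i j ps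
  · rintro (⟨p, hp, hzp⟩ | h)
    · refine hasPair_of_mem hlen hp (fun q => ?_) (fun q => ?_)
      · show (p.1 - i) * (q.2 - j) - (p.2 - j) * (q.1 - i) = 0
        rw [hzp.1, hzp.2]; ring
      · show (q.1 - i) * (p.2 - j) - (q.2 - j) * (p.1 - i) = 0
        rw [hzp.1, hzp.2]; ring
    · exact hasPair_mono
        (fun a b _ _ hab => cross_zero_of_canon_eq _ _ _ _ hab.1 hab.2.1 hab.2.2) h

theorem group_eq (i j : Int) (ps : List (Int × Int)) :
    ((PySem.List.pyRange 0 (ps.length : Int) 1).any (fun x =>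
      (PySem.List.pyRange (x + 1) (ps.length : Int) 1).any (fun y =>
        let p1 := PySem.List.pyGetD ps x (0, 0)
        let p2 := PySem.List.pyGetD ps y (0, 0)
        ((p1.1 - i) * (p2.1 - i) + (p1.2 - j) * (p2.2 - j)) ^ 2 ==
          ((i - p1.1) ^ 2 + (j - p1.2) ^ 2) * ((i - p2.1) ^ 2 + (j - p2.2) ^ 2)))) =
    (if ps.length < 2 then false else scanGroup i j ps PySem.Set.empty) := by
  by_cases hl : ps.length < 2
  · rw [if_pos hl]
    rw [Bool.eq_false_iff]
    intro h
    exact hasPair_short hl ((groupA_iff i j ps).mp h)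
  · rw [if_neg hl, Bool.eq_iff_iff, groupA_iff, scanGroup_iff,
      pair_iff_canon i j ps (by omega)]
    constructor
    · rintro (h | h)
      · exact Or.inl h
      · exact Or.inr (Or.inr h)
    · rintro (h | ⟨q, _, _, hmem⟩ | h)
      · exact Or.inl h
      · simp [PySem.Set.empty] at hmem
      · exact Or.inr h

theorem ports_eq (antennas : List (String × List (Int × Int))) (i j : Int) :
    isAntinode2 antennas i j = isAntinode2_alt antennas i j := by
  unfold isAntinode2 isAntinode2_alt
  induction antennas with
  | nil => rfl
  | cons g t ih =>
    rw [List.any_cons, List.any_cons, ih, group_eq i j g.2]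

-- ===== VERDICT (by name: the statement is the Claim_ definition above) =====
theorem isAntinode2_spec : Claim_equal_isAntinode2 := by
  intro antennas i j _
  exact ports_eq antennas i j
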